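-- pv_equiv track=rewrite | github.com/asottile/PokemonGo-Map | scrape.py | generate_location_steps2
-- ===== SOURCE A (Python) =====
-- def generate_location_steps2(num_steps):
--     x, y = 0, 0
--     yield x, y
--     for n in range(1, num_steps):
--         n += 1
--         for i in range(1, n):
--             x += 1
--             yield x, y
--         for i in range(1, n - 1):
--             y += 1
--             yield x, y
--         for i in range(1, n):
--             x -= 1
--             y += 1
--             yield x, y
--         for i in range(1, n):
--             x -= 1
--             yield x, y
--         for i in range(1, n):
--             y -= 1
--             yield x, y
--         for i in range(1, n):
--             x += 1
--             y -= 1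
--             yield x, y
--     for i in range(1, num_steps):
--         x += 1
--         yield x, y
-- ===== SOURCE B (Python) =====
-- def _ring_point(r, i):
--     """i-th point (1-based) of hex ring r, computed directly: segment s = (i-1)//r,
--     offset t within it; each segment is corner_s + t * dir_s, written out as arithmetic."""
--     s, t = divmod(i - 1, r)
--     t += 1
--     if s == 0:
--         return (r, -r + t)
--     if s == 1:
--         return (r - t, t)
--     if s == 2:
--         return (-t, r)
--     if s == 3:
--         return (-r, r - t)
--     if s == 4:
--         return (-r + t, -t)
--     return (t, -r)
--
--
-- def generate_location_steps2(num_steps):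
--     # The walk is exactly the centre followed by hex rings 1..num_steps-1, each
--     # ring traversed completely; every coordinate is computed in closed form from
--     # (ring, index) — no position state is carried, and A's trailing +x run is
--     # simply the last segment of the outermost ring.
--     yield (0, 0)
--     for r in range(1, num_steps):
--         for i in range(1, 6 * r + 1):
--             yield _ring_point(r, i)
-- ===== Notes on version B (the rewrite author's own statement) =====
-- stated objective: simpler
-- what changed: B carries no walk state: it computes every coordinate in closed form from (ring, index) via divmod — the centre plus complete hex rings 1..num_steps-1 — whereas A walks six stateful direction loops per ring plus a trailing +x run.
import Mathlib
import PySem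

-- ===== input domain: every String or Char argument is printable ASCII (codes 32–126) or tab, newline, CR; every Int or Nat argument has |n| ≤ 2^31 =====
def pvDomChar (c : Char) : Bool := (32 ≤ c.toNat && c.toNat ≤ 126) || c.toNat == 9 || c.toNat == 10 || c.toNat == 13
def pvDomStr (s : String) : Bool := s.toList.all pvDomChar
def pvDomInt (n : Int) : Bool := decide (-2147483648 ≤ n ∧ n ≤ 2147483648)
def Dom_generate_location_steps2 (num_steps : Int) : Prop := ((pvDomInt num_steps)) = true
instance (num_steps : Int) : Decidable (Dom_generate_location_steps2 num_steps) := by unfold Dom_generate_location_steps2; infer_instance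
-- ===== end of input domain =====

-- B carries no walk state: each coordinate is computed in closed form from (ring, index)
-- via divmod — the centre plus complete hex rings 1..num_steps-1 (simpler decomposition,
-- same cost); the list of yielded pairs is proved identical.

-- ===== PORT A =====
-- state (x, y, out): out is the list of yielded pairs so far
def generate_location_steps2 (num_steps : Int) : List (Int × Int) :=
  let s0 : Int × Int × List (Int × Int) := (0, 0, [(0, 0)])
  let s1 := (PySem.List.pyRange 1 num_steps 1).foldl (fun s n0 =>
    let n := n0 + 1
    let s := (PySem.List.pyRange 1 n 1).foldl
      (fun (s : Int × Int × List (Int × Int)) _ => (s.1 + 1, s.2.1, s.2.2 ++ [(s.1 + 1, s.2.1)])) s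
    let s := (PySem.List.pyRange 1 (n - 1) 1).foldl
      (fun (s : Int × Int × List (Int × Int)) _ => (s.1, s.2.1 + 1, s.2.2 ++ [(s.1, s.2.1 + 1)])) s
    let s := (PySem.List.pyRange 1 n 1).foldl
      (fun (s : Int × Int × List (Int × Int)) _ => (s.1 - 1, s.2.1 + 1, s.2.2 ++ [(s.1 - 1, s.2.1 + 1)])) s
    let s := (PySem.List.pyRange 1 n 1).foldl
      (fun (s : Int × Int × List (Int × Int)) _ => (s.1 - 1, s.2.1, s.2.2 ++ [(s.1 - 1, s.2.1)])) s
    let s := (PySem.List.pyRange 1 n 1).foldl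
      (fun (s : Int × Int × List (Int × Int)) _ => (s.1, s.2.1 - 1, s.2.2 ++ [(s.1, s.2.1 - 1)])) s
    (PySem.List.pyRange 1 n 1).foldl
      (fun (s : Int × Int × List (Int × Int)) _ => (s.1 + 1, s.2.1 - 1, s.2.2 ++ [(s.1 + 1, s.2.1 - 1)])) s) s0
  ((PySem.List.pyRange 1 num_steps 1).foldl
    (fun (s : Int × Int × List (Int × Int)) _ => (s.1 + 1, s.2.1, s.2.2 ++ [(s.1 + 1, s.2.1)])) s1).2.2

-- ===== PORT B =====
-- _ring_point: i-th point (1-based) of hex ring r, by pure arithmetic on (s, t) = divmod(i-1, r)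
def pvRingPoint (r i : Int) : Int × Int :=
  let s := PySem.Int.floordiv (i - 1) r
  let t := PySem.Int.mod (i - 1) r + 1
  if s = 0 then (r, -r + t)
  else if s = 1 then (r - t, t)
  else if s = 2 then (-t, r)
  else if s = 3 then (-r, r - t)
  else if s = 4 then (-r + t, -t)
  else (t, -r)

def generate_location_steps2_alt (num_steps : Int) : List (Int × Int) :=
  (0, 0) :: (PySem.List.pyRange 1 num_steps 1).flatMap (fun r =>
    (PySem.List.pyRange 1 (6 * r + 1) 1).map (fun i => pvRingPoint r i))

-- ===== PRECONDITION & SPEC =====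
def Spec_generate_location_steps2 (num_steps : Int) (out : List (Int × Int)) : Prop := out = generate_location_steps2_alt num_steps
instance (num_steps : Int) (out : List (Int × Int)) : Decidable (Spec_generate_location_steps2 num_steps out) := by unfold Spec_generate_location_steps2; infer_instance

-- ===== CLAIM (what is proved, stated in full; the proofs are below) =====
def Claim_equal_generate_location_steps2 : Prop := ∀ (num_steps : Int), Dom_generate_location_steps2 num_steps → Spec_generate_location_steps2 num_steps (generate_location_steps2 num_steps)

-- ===== LEMMAS AND PROOFS =====

-- ring r as a list, and the spiral prefix of m full rings
def pvRingPts (r : Nat) : List (Int × Int) :=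
  (List.range (6 * r)).map (fun (j : Nat) => pvRingPoint (r : Int) ((j : Int) + 1))

def pvPrefix (m : Nat) : List (Int × Int) :=
  (List.range m).flatMap (fun r => pvRingPts (r + 1))

-- the spiral after A has processed m ring-blocks (ring m is 5/6 done)
def pvPartial : Nat → List (Int × Int)
  | 0 => []
  | (m+1) => pvPrefix m ++ (pvRingPts (m + 1)).take (5 * (m + 1))

-- generic straight-line walk lemma
theorem pv_walk (dx dy : Int) :
    ∀ (l : List Int) (x y : Int) (out : List (Int × Int)),
    l.foldl (fun (s : Int × Int × List (Int × Int)) _ =>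
        (s.1 + dx, s.2.1 + dy, s.2.2 ++ [(s.1 + dx, s.2.1 + dy)])) (x, y, out)
    = (x + l.length * dx, y + l.length * dy,
       out ++ (List.range l.length).map (fun (t : Nat) => (x + ((t : Int) + 1) * dx, y + ((t : Int) + 1) * dy))) := by
  intro l
  induction l with
  | nil => intro x y out; simp
  | cons a l ih =>
    intro x y out
    simp only [List.foldl_cons, ih, List.length_cons]
    refine Prod.ext (by push_cast; ring) (Prod.ext (by push_cast; ring) ?_)
    simp only [List.range_succ_eq_map, List.map_cons, List.map_map, List.append_assoc,
      List.singleton_append]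
    congr 1
    congr 1
    · refine Prod.ext (by push_cast; ring) (by push_cast; ring)
    · apply List.map_congr_left
      intro t _
      simp only [Function.comp]
      refine Prod.ext (by push_cast; ring) (by push_cast; ring)

theorem pvRingPoint_seg (r : Nat) (hr : 0 < r) (s0 : Int) (j : Nat) (hj : j < r) :
    pvRingPoint (r : Int) (s0 * r + (j : Int) + 1) =
      (if s0 = 0 then ((r : Int), -(r : Int) + ((j : Int) + 1))
       else if s0 = 1 then ((r : Int) - ((j : Int) + 1), (j : Int) + 1)
       else if s0 = 2 then (-((j : Int) + 1), (r : Int))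
       else if s0 = 3 then (-(r : Int), (r : Int) - ((j : Int) + 1))
       else if s0 = 4 then (-(r : Int) + ((j : Int) + 1), -((j : Int) + 1))
       else ((j : Int) + 1, -(r : Int))) := by
  have hrpos : (0 : Int) < (r : Int) := by exact_mod_cast hr
  have hj' : (j : Int) < (r : Int) := by exact_mod_cast hj
  have hdiv : PySem.Int.floordiv (s0 * r + (j : Int) + 1 - 1) (r : Int) = s0 := by
    rw [PySem.Int.floordiv_eq_iff_of_pos hrpos]
    constructor
    · nlinarith [Int.natCast_nonneg j]
    · nlinarith
  have hmod : PySem.Int.mod (s0 * r + (j : Int) + 1 - 1) (r : Int) = (j : Int) := by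
    have h := PySem.Int.floordiv_mul_add_mod (s0 * r + (j : Int) + 1 - 1) (r : Int)
    rw [hdiv] at h
    linarith
  unfold pvRingPoint
  rw [hdiv, hmod]

-- A's six segment folds, with A's literal lambdas
theorem pv_walk1 (l : List Int) (x y : Int) (out : List (Int × Int)) :
    l.foldl (fun (s : Int × Int × List (Int × Int)) _ =>
        (s.1 + 1, s.2.1, s.2.2 ++ [(s.1 + 1, s.2.1)])) (x, y, out)
    = (x + l.length, y, out ++ (List.range l.length).map (fun (t : Nat) => (x + ((t : Int) + 1), y))) := by
  have h := pv_walk 1 0 l x y out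
  simpa using h

theorem pv_walk2 (l : List Int) (x y : Int) (out : List (Int × Int)) :
    l.foldl (fun (s : Int × Int × List (Int × Int)) _ =>
        (s.1, s.2.1 + 1, s.2.2 ++ [(s.1, s.2.1 + 1)])) (x, y, out)
    = (x, y + l.length, out ++ (List.range l.length).map (fun (t : Nat) => (x, y + ((t : Int) + 1)))) := by
  have h := pv_walk 0 1 l x y out
  simpa using h

theorem pv_walk3 (l : List Int) (x y : Int) (out : List (Int × Int)) :
    l.foldl (fun (s : Int × Int × List (Int × Int)) _ =>
        (s.1 - 1, s.2.1 + 1, s.2.2 ++ [(s.1 - 1, s.2.1 + 1)])) (x, y, out)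
    = (x - l.length, y + l.length, out ++ (List.range l.length).map (fun (t : Nat) => (x - ((t : Int) + 1), y + ((t : Int) + 1)))) := by
  have h := pv_walk (-1) 1 l x y out
  simpa [sub_eq_add_neg] using h

theorem pv_walk4 (l : List Int) (x y : Int) (out : List (Int × Int)) :
    l.foldl (fun (s : Int × Int × List (Int × Int)) _ =>
        (s.1 - 1, s.2.1, s.2.2 ++ [(s.1 - 1, s.2.1)])) (x, y, out)
    = (x - l.length, y, out ++ (List.range l.length).map (fun (t : Nat) => (x - ((t : Int) + 1), y))) := by
  have h := pv_walk (-1) 0 l x y out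
  simpa [sub_eq_add_neg] using h

theorem pv_walk5 (l : List Int) (x y : Int) (out : List (Int × Int)) :
    l.foldl (fun (s : Int × Int × List (Int × Int)) _ =>
        (s.1, s.2.1 - 1, s.2.2 ++ [(s.1, s.2.1 - 1)])) (x, y, out)
    = (x, y - l.length, out ++ (List.range l.length).map (fun (t : Nat) => (x, y - ((t : Int) + 1)))) := by
  have h := pv_walk 0 (-1) l x y out
  simpa [sub_eq_add_neg] using h

theorem pv_walk6 (l : List Int) (x y : Int) (out : List (Int × Int)) :
    l.foldl (fun (s : Int × Int × List (Int × Int)) _ =>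
        (s.1 + 1, s.2.1 - 1, s.2.2 ++ [(s.1 + 1, s.2.1 - 1)])) (x, y, out)
    = (x + l.length, y - l.length, out ++ (List.range l.length).map (fun (t : Nat) => (x + ((t : Int) + 1), y - ((t : Int) + 1)))) := by
  have h := pv_walk 1 (-1) l x y out
  simpa [sub_eq_add_neg] using h

-- ring r = its first 5r points ++ its closing (+x) run
theorem pv_ring_split (r : Nat) (hr : 0 < r) :
    pvRingPts r = (pvRingPts r).take (5 * r) ++ (List.range r).map (fun (t : Nat) => (((t : Int) + 1), -(r : Int))) := by
  unfold pvRingPts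
  have h6 : 6 * r = 5 * r + r := by ring
  rw [h6, List.range_add, List.map_append, List.take_append_of_le_length (by simp),
    List.take_of_length_le (by simp), List.map_map]
  congr 1
  apply List.map_congr_left
  intro t ht
  have ht' : t < r := List.mem_range.mp ht
  have harg : ((↑(5 * r + t) : Int) + 1) = 5 * (r : Int) + (t : Int) + 1 := by push_cast; ring
  simp only [Function.comp_apply]
  rw [harg, pvRingPoint_seg r hr 5 t ht']
  norm_num

theorem pv_partial_drop (m : Nat) :
    pvPartial m ++ (List.range m).map (fun (t : Nat) => (((t : Int) + 1), -(m : Int))) = pvPrefix m := by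
  cases m with
  | zero => simp [pvPartial, pvPrefix]
  | succ k =>
    show (pvPrefix k ++ (pvRingPts (k+1)).take (5*(k+1))) ++ _ = pvPrefix (k+1)
    rw [List.append_assoc, ← pv_ring_split (k+1) (Nat.succ_pos k)]
    unfold pvPrefix
    rw [List.range_succ, List.flatMap_append]
    simp


-- the six walked segments of block k+1, appended to the spiral so far, complete ring k
-- and lay down the first 5(k+1) points of ring k+1
theorem pv_chunk (k : Nat) :
    pvPartial k
      ++ List.map (fun (t : Nat) => ((0:Int) + ((t:Int) + 1), -(k:Int))) (List.range (k+1))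
      ++ List.map (fun (t : Nat) => ((0:Int) + (((k+1 : Nat)):Int), -(k:Int) + ((t:Int) + 1))) (List.range k)
      ++ List.map (fun (t : Nat) => ((0:Int) + (((k+1:Nat)):Int) - ((t:Int) + 1), -(k:Int) + (k:Int) + ((t:Int) + 1))) (List.range (k+1))
      ++ List.map (fun (t : Nat) => ((0:Int) + (((k+1:Nat)):Int) - (((k+1:Nat)):Int) - ((t:Int) + 1), -(k:Int) + (k:Int) + (((k+1:Nat)):Int))) (List.range (k+1))
      ++ List.map (fun (t : Nat) => ((0:Int) + (((k+1:Nat)):Int) - (((k+1:Nat)):Int) - (((k+1:Nat)):Int), -(k:Int) + (k:Int) + (((k+1:Nat)):Int) - ((t:Int) + 1))) (List.range (k+1))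
      ++ List.map (fun (t : Nat) => ((0:Int) + (((k+1:Nat)):Int) - (((k+1:Nat)):Int) - (((k+1:Nat)):Int) + ((t:Int) + 1), -(k:Int) + (k:Int) + (((k+1:Nat)):Int) - (((k+1:Nat)):Int) - ((t:Int) + 1))) (List.range (k+1))
    = pvPartial (k+1) := by
  have hr : 0 < k + 1 := Nat.succ_pos k
  have hseg1 : List.map (fun (t : Nat) => ((0:Int) + ((t:Int) + 1), -(k:Int))) (List.range (k+1))
      = List.map (fun (t : Nat) => (((t:Int) + 1), -(k:Int))) (List.range k) ++ [(((k:Int) + 1), -(k:Int))] := by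
    rw [List.range_succ, List.map_append]
    congr 1
    · apply List.map_congr_left; intro t _; simp
    · simp
  have htake : (pvRingPts (k+1)).take (5*(k+1)) =
      (List.range (5*(k+1))).map (fun (j : Nat) => pvRingPoint (((k+1 : Nat)) : Int) ((j:Int)+1)) := by
    unfold pvRingPts
    rw [show 6*(k+1) = 5*(k+1) + (k+1) by ring, List.range_add, List.map_append,
        List.take_append_of_le_length (by simp), List.take_of_length_le (by simp)]
  show _ = pvPrefix k ++ (pvRingPts (k+1)).take (5*(k+1))
  rw [htake, hseg1]
  set n : Nat := k + 1 with hn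
  rw [show 5*n = n + (n + (n + (n + n))) by ring]
  simp only [List.range_add, List.map_append, List.map_map, List.append_assoc]
  rw [← List.append_assoc (pvPartial k), pv_partial_drop k]
  simp only [List.singleton_append]
  congr 1
  have hr : 0 < n := by omega

  have hmerge : (((k:Int) + 1), -(k:Int)) :: List.map (fun (t : Nat) => ((0:Int) + ((n:Nat):Int), -(k:Int) + ((t:Int) + 1))) (List.range k)
      = List.map (fun (j : Nat) => pvRingPoint ((n:Nat):Int) ((j:Int)+1)) (List.range n) := by
    rw [show List.range n = 0 :: (List.range k).map Nat.succ from by rw [hn]; exact List.range_succ_eq_map]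
    simp only [List.map_cons, List.map_map]
    congr 1
    · rw [show ((0:Nat) : Int) + 1 = 0 * ((n : Nat) : Int) + ((0:Nat) : Int) + 1 by ring,
          pvRingPoint_seg n hr 0 0 hr]
      norm_num
      omega
    · apply List.map_congr_left
      intro t ht
      have ht' : t + 1 < n := by have := List.mem_range.mp ht; omega
      simp only [Function.comp_apply]
      rw [show ((↑(Nat.succ t) : Int) + 1) = 0 * ((n : Nat) : Int) + (↑(t+1) : Int) + 1 by push_cast; ring,
          pvRingPoint_seg n hr 0 (t+1) ht']
      norm_num
      omega
  try simp only [List.append_assoc]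
  rw [← List.cons_append, hmerge]
  congr 1
  congr 1
  · -- s0 = 1
    apply List.map_congr_left
    intro t ht
    have ht' : t < n := List.mem_range.mp ht
    simp only [Function.comp_apply]
    rw [show ((↑(n + t) : Int) + 1) = 1 * ((n : Nat) : Int) + (↑t : Int) + 1 by push_cast; ring,
        pvRingPoint_seg n hr 1 t ht']
    norm_num
  congr 1
  · -- s0 = 2
    apply List.map_congr_left
    intro t ht
    have ht' : t < n := List.mem_range.mp ht
    simp only [Function.comp_apply]
    rw [show ((↑(n + (n + t)) : Int) + 1) = 2 * ((n : Nat) : Int) + (↑t : Int) + 1 by push_cast; ring,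
        pvRingPoint_seg n hr 2 t ht']
    norm_num
  congr 1
  · -- s0 = 3
    apply List.map_congr_left
    intro t ht
    have ht' : t < n := List.mem_range.mp ht
    simp only [Function.comp_apply]
    rw [show ((↑(n + (n + (n + t))) : Int) + 1) = 3 * ((n : Nat) : Int) + (↑t : Int) + 1 by push_cast; ring,
        pvRingPoint_seg n hr 3 t ht']
    norm_num
  · -- s0 = 4
    apply List.map_congr_left
    intro t ht
    have ht' : t < n := List.mem_range.mp ht
    simp only [Function.comp_apply]
    rw [show ((↑(n + (n + (n + (n + t)))) : Int) + 1) = 4 * ((n : Nat) : Int) + (↑t : Int) + 1 by push_cast; ring,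
        pvRingPoint_seg n hr 4 t ht']
    norm_num

theorem pv_A_blocks (m : Nat) :
    (PySem.List.pyRange 1 (1 + (m : Int)) 1).foldl (fun s n0 =>
      let n := n0 + 1
      let s := (PySem.List.pyRange 1 n 1).foldl
        (fun (s : Int × Int × List (Int × Int)) _ => (s.1 + 1, s.2.1, s.2.2 ++ [(s.1 + 1, s.2.1)])) s
      let s := (PySem.List.pyRange 1 (n - 1) 1).foldl
        (fun (s : Int × Int × List (Int × Int)) _ => (s.1, s.2.1 + 1, s.2.2 ++ [(s.1, s.2.1 + 1)])) s
      let s := (PySem.List.pyRange 1 n 1).foldl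
        (fun (s : Int × Int × List (Int × Int)) _ => (s.1 - 1, s.2.1 + 1, s.2.2 ++ [(s.1 - 1, s.2.1 + 1)])) s
      let s := (PySem.List.pyRange 1 n 1).foldl
        (fun (s : Int × Int × List (Int × Int)) _ => (s.1 - 1, s.2.1, s.2.2 ++ [(s.1 - 1, s.2.1)])) s
      let s := (PySem.List.pyRange 1 n 1).foldl
        (fun (s : Int × Int × List (Int × Int)) _ => (s.1, s.2.1 - 1, s.2.2 ++ [(s.1, s.2.1 - 1)])) s
      (PySem.List.pyRange 1 n 1).foldl
        (fun (s : Int × Int × List (Int × Int)) _ => (s.1 + 1, s.2.1 - 1, s.2.2 ++ [(s.1 + 1, s.2.1 - 1)])) s)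
      ((0 : Int), (0 : Int), [((0 : Int), (0 : Int))])
    = (0, -(m : Int), ((0 : Int), (0 : Int)) :: pvPartial m) := by
  induction m with
  | zero =>
    rw [show ((1 : Int) + (0 : Nat)) = 1 by norm_num, PySem.List.pyRange_one_eq_nil le_rfl]
    simp [pvPartial]
  | succ k ih =>
    have hsplit : PySem.List.pyRange 1 (1 + ((k+1 : Nat) : Int)) 1
        = PySem.List.pyRange 1 (1 + (k : Int)) 1 ++ [1 + (k : Int)] := by
      have : (1 + ((k+1 : Nat) : Int)) = (1 + (k : Int)) + 1 := by push_cast; ring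
      rw [this, PySem.List.pyRange_one_succ_right (by omega)]
    rw [hsplit, List.foldl_append, ih]
    dsimp only [List.foldl_cons, List.foldl_nil]
    rw [pv_walk1, pv_walk2, pv_walk3, pv_walk4, pv_walk5, pv_walk6]
    simp only [PySem.List.length_pyRange_one]
    rw [show ((1 : Int) + (k : Int) + 1 - 1).toNat = k + 1 by omega,
        show ((1 : Int) + (k : Int) + 1 - 1 - 1).toNat = k by omega]
    refine Prod.ext (by push_cast; ring) (Prod.ext (by push_cast; ring) ?_)
    dsimp only
    simp only [List.cons_append]
    congr 1
    exact pv_chunk k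

theorem pv_B_prefix (m : Nat) :
    (PySem.List.pyRange 1 (1 + (m : Int)) 1).flatMap (fun r =>
      (PySem.List.pyRange 1 (6 * r + 1) 1).map (fun i => pvRingPoint r i)) = pvPrefix m := by
  induction m with
  | zero =>
    rw [show ((1 : Int) + (0 : Nat)) = 1 by norm_num, PySem.List.pyRange_one_eq_nil le_rfl]
    simp [pvPrefix]
  | succ k ih =>
    have hsplit : PySem.List.pyRange 1 (1 + ((k+1 : Nat) : Int)) 1
        = PySem.List.pyRange 1 (1 + (k : Int)) 1 ++ [1 + (k : Int)] := by
      have : (1 + ((k+1 : Nat) : Int)) = (1 + (k : Int)) + 1 := by push_cast; ring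
      rw [this, PySem.List.pyRange_one_succ_right (by omega)]
    rw [hsplit, List.flatMap_append, ih]
    unfold pvPrefix
    rw [List.range_succ, List.flatMap_append]
    congr 1
    simp only [List.flatMap_cons, List.flatMap_nil, List.append_nil]
    rw [PySem.List.pyRange_one]
    rw [List.map_map]
    unfold pvRingPts
    have hT : (6 * (1 + (k : Int)) + 1 - 1).toNat = 6 * (k + 1) := by omega
    rw [hT]
    apply List.map_congr_left
    intro j hj
    simp only [Function.comp_apply]
    congr 1 <;> push_cast <;> ring

-- ===== VERDICT (by name: the statement is the Claim_ definition above) =====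
theorem generate_location_steps2_spec : Claim_equal_generate_location_steps2 := by
  intro num_steps _
  unfold Spec_generate_location_steps2 generate_location_steps2 generate_location_steps2_alt
  dsimp only
  by_cases h : num_steps ≤ 1
  · rw [PySem.List.pyRange_one_eq_nil h]
    simp
  · set m : Nat := (num_steps - 1).toNat with hm
    have hn : num_steps = 1 + (m : Int) := by omega
    rw [hn, pv_A_blocks m, pv_walk1, pv_B_prefix m]
    simp only [PySem.List.length_pyRange_one]
    have h1 : ((1 : Int) + (m : Int) - 1).toNat = m := by omega
    rw [h1]
    simp only [List.cons_append, zero_add]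
    rw [pv_partial_drop m]
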